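-- pv_equiv track=rewrite | github.com/platipus9999/Proxies-Checker | check_proxies.py | yellow_to_red
-- ===== SOURCE A (Python) =====
-- def yellow_to_red(text: str):
--     col = ""
--     green = 250
--     for line in text.splitlines():
--         col += (f"\033[38;2;255;{green};0m{line}\033[0m\n")
--         if not green == 0:
--             green -= 25
--             if green < 0:
--                 green = 0
--     return col
-- ===== SOURCE B (Python) =====
-- _PREFIXES = [f"\033[38;2;255;{g};0m" for g in range(250, -1, -25)]
--
-- def yellow_to_red(text: str):
--     lines = text.splitlines()
--     head = lines[:len(_PREFIXES)]
--     tail = lines[len(_PREFIXES):]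
--     parts = [p + l + "\033[0m\n" for p, l in zip(_PREFIXES, head)]
--     parts += ["\033[38;2;255;0;0m" + l + "\033[0m\n" for l in tail]
--     return "".join(parts)
-- ===== Notes on version B (the rewrite author's own statement) =====
-- stated objective: simpler
-- what changed: Replaces A's running, clamped colour accumulator with a precomputed 11-entry prefix table: the first lines are zipped against the table and every remaining line gets the constant green-0 prefix, so the loop carries no state and does no per-line arithmetic.
import Mathlib
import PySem

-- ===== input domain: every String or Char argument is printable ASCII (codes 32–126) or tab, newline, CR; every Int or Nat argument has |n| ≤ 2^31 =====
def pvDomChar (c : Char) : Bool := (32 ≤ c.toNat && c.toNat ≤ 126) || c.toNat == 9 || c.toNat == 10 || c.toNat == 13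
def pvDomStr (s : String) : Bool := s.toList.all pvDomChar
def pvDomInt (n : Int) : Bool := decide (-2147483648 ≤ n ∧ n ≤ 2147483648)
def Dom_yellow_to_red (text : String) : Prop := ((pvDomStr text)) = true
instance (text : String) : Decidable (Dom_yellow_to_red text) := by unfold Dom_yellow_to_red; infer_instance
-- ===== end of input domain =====

-- B is table-driven: a precomputed list of the 11 colour prefixes (250,225,…,0), zipped
-- against the first lines, with all remaining lines given the constant green-0 prefix —
-- simpler staged decomposition, no running colour state.


-- ===== PORT A =====
-- literal transliteration: fold over splitlines carrying (col, green)
def yellow_to_red (text : String) : String :=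
  ((PySem.Str.splitlines text).foldl
    (fun (st : String × Int) line =>
      let col := st.1 ++ ("\x1b[38;2;255;" ++ PySem.Int.toStr st.2 ++ ";0m" ++ line ++ "\x1b[0m\n")
      let green := if ¬ st.2 = 0 then (let g := st.2 - 25; if g < 0 then 0 else g) else st.2
      (col, green))
    ("", 250)).1

-- ===== PORT B =====
-- _PREFIXES = [f"\033[38;2;255;{g};0m" for g in range(250, -1, -25)]
def pvPrefixes : List String :=
  (PySem.List.pyRange 250 (-1) (-25)).map
    (fun g => "\x1b[38;2;255;" ++ PySem.Int.toStr g ++ ";0m")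

def yellow_to_red_alt (text : String) : String :=
  let lines := PySem.Str.splitlines text
  let head := PySem.List.slice lines none (some (pvPrefixes.length : Int))
  let tail := PySem.List.slice lines (some (pvPrefixes.length : Int)) none
  let parts := (pvPrefixes.zip head).map (fun p => p.1 ++ p.2 ++ "\x1b[0m\n")
  let parts := parts ++ tail.map (fun l => "\x1b[38;2;255;0;0m" ++ l ++ "\x1b[0m\n")
  PySem.Str.join "" parts

-- ===== PRECONDITION & SPEC =====
def Spec_yellow_to_red (text : String) (out : String) : Prop := out = yellow_to_red_alt text
instance (text : String) (out : String) : Decidable (Spec_yellow_to_red text out) := by unfold Spec_yellow_to_red; infer_instance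

-- ===== CLAIM (what is proved, stated in full; the proofs are below) =====
def Claim_equal_yellow_to_red : Prop := ∀ (text : String), Dom_yellow_to_red text → Spec_yellow_to_red text (yellow_to_red text)

-- ===== LEMMAS AND PROOFS =====

-- A's loop body, named for the proofs
def pvStepA (st : String × Int) (line : String) : String × Int :=
  let col := st.1 ++ ("\x1b[38;2;255;" ++ PySem.Int.toStr st.2 ++ ";0m" ++ line ++ "\x1b[0m\n")
  let green := if ¬ st.2 = 0 then (let g := st.2 - 25; if g < 0 then 0 else g) else st.2
  (col, green)

-- the common per-index piece both proofs converge to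
def pvPieceB (p : Int × String) : String :=
  "\x1b[38;2;255;" ++ PySem.Int.toStr (max (250 - 25 * p.1) 0) ++ ";0m" ++ p.2 ++ "\x1b[0m\n"

theorem pvJoinEmpty_cons (p : String) (rest : List String) :
    PySem.Str.join "" (p :: rest) = p ++ PySem.Str.join "" rest := by
  cases rest with
  | nil =>
      apply String.ext
      simp [PySem.Str.toList_join, PySem.Chars.join, List.intercalate]
  | cons q r =>
      apply String.ext
      simp [PySem.Str.toList_join, PySem.Chars.join, List.intercalate]

-- the green invariant: starting value max(250-25*i,0), A's update advances i by one
theorem pvGreen_step (i : Int) (hi : 0 ≤ i) :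
    (if ¬ (max (250 - 25 * i) 0) = 0 then
        (let g := (max (250 - 25 * i) 0) - 25; if g < 0 then 0 else g)
      else (max (250 - 25 * i) 0)) = max (250 - 25 * (i + 1)) 0 := by
  by_cases h : 250 - 25 * i ≤ 0
  · simp only [max_eq_right h]
    have : 250 - 25 * (i + 1) ≤ 0 := by omega
    simp [max_eq_right this]
  · have h1 : max (250 - 25 * i) 0 = 250 - 25 * i := max_eq_left (by omega)
    rw [h1]
    have hne : ¬ (250 - 25 * i) = 0 := by omega
    simp only [hne, not_false_iff, if_true]
    omega

-- A's fold equals the per-index form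
theorem pvLoop_eq (lines : List String) (col : String) (i : Int) (hi : 0 ≤ i) :
    (lines.foldl pvStepA (col, max (250 - 25 * i) 0)).1
      = col ++ PySem.Str.join "" ((PySem.List.enumerate lines i).map pvPieceB) := by
  induction lines generalizing col i with
  | nil =>
      apply String.ext
      simp [PySem.List.enumerate_nil, PySem.Str.toList_join, PySem.Chars.join, List.intercalate]
  | cons l rest ih =>
      rw [List.foldl_cons]
      have hstep : pvStepA (col, max (250 - 25 * i) 0) l
          = (col ++ pvPieceB (i, l), max (250 - 25 * (i + 1)) 0) := by
        unfold pvStepA pvPieceB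
        refine Prod.ext ?_ ?_
        · simp
        · exact pvGreen_step i hi
      rw [hstep, ih (col ++ pvPieceB (i, l)) (i + 1) (by omega),
        PySem.List.enumerate_cons, List.map_cons, pvJoinEmpty_cons]
      apply String.ext
      simp

-- the prefix table, evaluated
theorem pvPrefixes_len : pvPrefixes.length = 11 := by decide

-- table step: for n ≤ 10, dropping n prefixes exposes the piece for index n
theorem pvPrefixes_drop (n : Nat) (hn : n ≤ 10) :
    pvPrefixes.drop n
      = ("\x1b[38;2;255;" ++ PySem.Int.toStr (max (250 - 25 * (n : Int)) 0) ++ ";0m")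
        :: pvPrefixes.drop (n + 1) := by
  interval_cases n <;> decide

-- B's staged (zip-head ++ constant-tail) form equals the per-index form
theorem pvStaged_eq (lines : List String) (n : Nat) :
    PySem.Str.join ""
      (((pvPrefixes.drop n).zip lines).map (fun p => p.1 ++ p.2 ++ "\x1b[0m\n")
        ++ (lines.drop (11 - n)).map (fun l => "\x1b[38;2;255;0;0m" ++ l ++ "\x1b[0m\n"))
      = PySem.Str.join "" ((PySem.List.enumerate lines (n : Int)).map pvPieceB) := by
  induction lines generalizing n with
  | nil => simp [PySem.List.enumerate_nil]
  | cons l rest ih =>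
      by_cases hn : n ≤ 10
      · rw [pvPrefixes_drop n hn]
        rw [PySem.List.enumerate_cons, List.map_cons, pvJoinEmpty_cons]
        have htail : (l :: rest).drop (11 - n) = rest.drop (11 - (n + 1)) := by
          have : 11 - n = (11 - (n + 1)) + 1 := by omega
          rw [this]; rfl
        rw [List.zip_cons_cons, List.map_cons, List.cons_append, pvJoinEmpty_cons, htail]
        have h2 := ih (n + 1)
        rw [show (((n + 1 : Nat)) : Int) = (n : Int) + 1 by push_cast; ring] at h2
        rw [← h2]
        rfl
      · have hdrop : pvPrefixes.drop n = [] :=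
          List.drop_eq_nil_of_le (by rw [pvPrefixes_len]; omega)
        have h0 : 11 - n = 0 := by omega
        rw [hdrop, h0]
        simp only [List.zip_nil_left, List.map_nil, List.nil_append, List.drop_zero]
        rw [PySem.List.enumerate_cons, List.map_cons, List.map_cons,
          pvJoinEmpty_cons, pvJoinEmpty_cons]
        have hpiece : pvPieceB ((n : Int), l) = "\x1b[38;2;255;0;0m" ++ l ++ "\x1b[0m\n" := by
          unfold pvPieceB
          have : max (250 - 25 * (n : Int)) 0 = 0 := by
            apply max_eq_right; omega
          rw [this]; rfl
        rw [hpiece]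
        congr 1
        have hdrop' : rest.drop (11 - (n + 1)) = rest := by
          rw [show 11 - (n + 1) = 0 by omega, List.drop_zero]
        have h2 := ih (n + 1)
        rw [show (((n + 1 : Nat)) : Int) = (n : Int) + 1 by push_cast; ring,
          List.drop_eq_nil_of_le (show pvPrefixes.length ≤ n + 1 by rw [pvPrefixes_len]; omega),
          hdrop'] at h2
        simpa using h2

-- zip truncates: taking exactly ps.length elements changes nothing
theorem pvZipTake (ps ls : List String) : ps.zip (ls.take ps.length) = ps.zip ls := by
  induction ps generalizing ls with
  | nil => rfl
  | cons p ps ih =>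
      cases ls with
      | nil => rfl
      | cons l ls => simp [List.zip_cons_cons, ih]

-- B equals the per-index form
theorem pvAlt_eq (text : String) :
    yellow_to_red_alt text
      = PySem.Str.join "" ((PySem.List.enumerate (PySem.Str.splitlines text) 0).map pvPieceB) := by
  have h := pvStaged_eq (PySem.Str.splitlines text) 0
  simp only [Nat.cast_zero, List.drop_zero, Nat.sub_zero] at h
  simp only [yellow_to_red_alt]
  rw [PySem.List.slice_to_natCast, PySem.List.slice_from_natCast, pvZipTake, pvPrefixes_len, h]

-- ===== VERDICT (by name: the statement is the Claim_ definition above) =====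
theorem yellow_to_red_spec : Claim_equal_yellow_to_red := by
  intro text _
  unfold Spec_yellow_to_red yellow_to_red
  have hA := pvLoop_eq (PySem.Str.splitlines text) "" 0 le_rfl
  simp only [show ((250 : Int) - 25 * 0) = 250 by norm_num,
    show (max (250:Int) 0) = 250 by norm_num] at hA
  rw [show ((PySem.Str.splitlines text).foldl
      (fun (st : String × Int) line =>
        let col := st.1 ++ ("\x1b[38;2;255;" ++ PySem.Int.toStr st.2 ++ ";0m" ++ line ++ "\x1b[0m\n")
        let green := if ¬ st.2 = 0 then (let g := st.2 - 25; if g < 0 then 0 else g) else st.2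
        (col, green)) ("", 250)) = (PySem.Str.splitlines text).foldl pvStepA ("", 250) from rfl, hA]
  rw [pvAlt_eq]
  simp
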